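-- pv_equiv track=rewrite | github.com/monnn/Programming101 | week0/contains_digit.py | contains_digit
-- ===== SOURCE A (Python) =====
-- def contains_digit(number, digit):
--     while number > 0:
--         single_digit = number % 10
--         if digit == single_digit:
--             return True
--         else:
--             number = number // 10
--     return False
-- ===== SOURCE B (Python) =====
-- def contains_digit(number, digit):
--     if number <= 0:
--         return False
--     return any(int(c) == digit for c in str(number))
-- ===== Notes on version B (the rewrite author's own statement) =====
-- stated objective: idiomatic
-- what changed: Replaces the arithmetic mod/floordiv digit-extraction loop with a scan over the decimal string representation (any(int(c) == digit for c in str(number))).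
import Mathlib
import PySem

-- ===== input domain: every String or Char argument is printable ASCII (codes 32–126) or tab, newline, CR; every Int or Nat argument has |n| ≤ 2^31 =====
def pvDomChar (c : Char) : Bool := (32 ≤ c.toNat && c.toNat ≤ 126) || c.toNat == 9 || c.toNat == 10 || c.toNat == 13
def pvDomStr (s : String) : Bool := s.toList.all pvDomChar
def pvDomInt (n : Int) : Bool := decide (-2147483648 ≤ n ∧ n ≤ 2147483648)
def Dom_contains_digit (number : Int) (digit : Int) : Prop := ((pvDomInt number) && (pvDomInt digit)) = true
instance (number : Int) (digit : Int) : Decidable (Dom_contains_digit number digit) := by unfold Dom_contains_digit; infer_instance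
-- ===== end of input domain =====

-- B replaces A's arithmetic mod/floordiv digit-extraction loop with a scan over str(number); same result, no speed claim.

-- ===== PORT A =====
-- while number > 0: take number % 10, return True on match, else number //= 10; return False after the loop
def contains_digit (number : Int) (digit : Int) : Bool :=
  if _h : number > 0 then
    if digit == PySem.Int.mod number 10 then true
    else contains_digit (PySem.Int.floordiv number 10) digit
  else false
termination_by number.toNat
decreasing_by
  simp only [PySem.Int.floordiv]
  rw [Int.fdiv_eq_ediv]
  simp
  omega

-- ===== PORT B =====
-- int(c) for a character of str(number) with number > 0 always parses, so the `.getD 0` default is unreachable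
def contains_digit_alt (number : Int) (digit : Int) : Bool :=
  if number ≤ 0 then false
  else (PySem.Int.toStr number).toList.any
        (fun c => (PySem.Int.ofStr? (String.ofList [c])).getD 0 == digit)

-- ===== PRECONDITION & SPEC =====
def Spec_contains_digit (number : Int) (digit : Int) (out : Bool) : Prop := out = contains_digit_alt number digit
instance (number : Int) (digit : Int) (out : Bool) : Decidable (Spec_contains_digit number digit out) := by unfold Spec_contains_digit; infer_instance

-- ===== CLAIM (what is proved, stated in full; the proofs are below) =====
def Claim_equal_contains_digit : Prop := ∀ (number : Int) (digit : Int), Dom_contains_digit number digit → Spec_contains_digit number digit (contains_digit number digit)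

-- ===== LEMMAS AND PROOFS =====

-- A's loop, transplanted to the natural-number side: test n % 10, then recurse on n / 10 until it hits 0
def pvDigAny (p : Char → Bool) (n : Nat) : Bool :=
  p (Nat.digitChar (n % 10)) || (if _h : n / 10 = 0 then false else pvDigAny p (n / 10))
termination_by n
decreasing_by omega

-- `any` over Nat.toDigitsCore (the engine behind str(n)) is pvDigAny, accumulator split off
lemma pvToDigitsCore_any (p : Char → Bool) :
    ∀ (fuel n : Nat) (acc : List Char), n < fuel →
      (Nat.toDigitsCore 10 fuel n acc).any p = (pvDigAny p n || acc.any p) := by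
  intro fuel
  induction fuel with
  | zero => intro n acc h; omega
  | succ f ih =>
    intro n acc h
    rw [Nat.toDigitsCore, pvDigAny]
    by_cases h0 : n / 10 = 0
    · simp [h0]
    · rw [if_neg h0, dif_neg h0, ih (n / 10) _ (by omega)]
      simp [List.any_cons]
      ac_rfl

-- int("<digit char>") really is that digit
lemma pvOfDigitChar : ∀ k : Nat, k < 10 →
    (PySem.Int.ofStr? (String.ofList [Nat.digitChar k])).getD 0 = (k : Int) := by decide

lemma pvMod_toNat (n : Int) (h : 0 < n) : PySem.Int.mod n 10 = ((n.toNat % 10 : Nat) : Int) := by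
  simp [PySem.Int.mod, Int.fmod_eq_emod]; omega

lemma pvFloordiv_toNat (n : Int) (h : 0 < n) : PySem.Int.floordiv n 10 = ((n.toNat / 10 : Nat) : Int) := by
  simp [PySem.Int.floordiv, Int.fdiv_eq_ediv]; omega

-- A's loop computes pvDigAny of the digit-comparison predicate
lemma pvA_eq_digAny (digit : Int) :
    ∀ (k : Nat) (number : Int), number.toNat ≤ k → 0 < number →
      contains_digit number digit
        = pvDigAny (fun c => (PySem.Int.ofStr? (String.ofList [c])).getD 0 == digit) number.toNat := by
  intro k
  induction k with
  | zero => intro number hk h0; omega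
  | succ k ih =>
    intro number hk h0
    rw [contains_digit.eq_def, pvDigAny]
    rw [dif_pos h0]
    rw [pvMod_toNat number h0, pvOfDigitChar (number.toNat % 10) (by omega)]
    by_cases heq : digit = ((number.toNat % 10 : Nat) : Int)
    · simp [heq]
    · rw [if_neg (by simpa using heq)]
      rw [show ((((number.toNat % 10 : Nat) : Int) == digit) = false) from beq_eq_false_iff_ne.mpr (Ne.symm heq)]
      simp only [Bool.false_or]
      by_cases hz : number.toNat / 10 = 0
      · rw [dif_pos hz, contains_digit.eq_def]
        rw [dif_neg (by rw [pvFloordiv_toNat number h0, hz]; simp)]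
      · rw [dif_neg hz,
            ih (PySem.Int.floordiv number 10) (by rw [pvFloordiv_toNat number h0]; omega)
               (by rw [pvFloordiv_toNat number h0]; omega)]
        congr 1
        rw [pvFloordiv_toNat number h0]
        exact Int.toNat_natCast _

-- ===== VERDICT (by name: the statement is the Claim_ definition above) =====
theorem contains_digit_spec : Claim_equal_contains_digit := by
  intro number digit _
  unfold Spec_contains_digit contains_digit_alt
  by_cases h : number ≤ 0
  · rw [contains_digit.eq_def]
    simp [h]
  · replace h : 0 < number := by omega
    rw [if_neg (by omega : ¬ number ≤ 0)]
    rw [PySem.Int.toList_toStr]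
    unfold PySem.Int.toChars
    rw [if_neg (by omega : ¬ number < 0)]
    unfold Nat.toDigits
    rw [pvToDigitsCore_any _ _ _ _ (by omega)]
    simp [pvA_eq_digAny digit number.toNat number (le_refl _) h]
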